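-- pv_equiv track=rewrite | github.com/MrBrantCode/unitest_baseline | mut_generate/mist_train_cf/cf_20506/solution.py | remove_carrots
-- ===== SOURCE A (Python) =====
-- def remove_carrots(lst):
--     if not lst:
--         return []
--     new_lst = []
--     carrot_encountered = False
--     for item in lst:
--         if item != "Carrots" or not carrot_encountered:
--             new_lst.append(item)
--             if item == "Carrots":
--                 carrot_encountered = True
--     return new_lst
-- ===== SOURCE B (Python) =====
-- def remove_carrots(lst):
--     first = lst.index("Carrots") if "Carrots" in lst else -1
--     return [x for i, x in enumerate(lst) if x != "Carrots" or i == first]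
-- ===== Notes on version B (the rewrite author's own statement) =====
-- stated objective: simpler
-- what changed: Replaces A's running boolean flag and appends with a precomputed first-occurrence index followed by a single position-aware comprehension.
import Mathlib
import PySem

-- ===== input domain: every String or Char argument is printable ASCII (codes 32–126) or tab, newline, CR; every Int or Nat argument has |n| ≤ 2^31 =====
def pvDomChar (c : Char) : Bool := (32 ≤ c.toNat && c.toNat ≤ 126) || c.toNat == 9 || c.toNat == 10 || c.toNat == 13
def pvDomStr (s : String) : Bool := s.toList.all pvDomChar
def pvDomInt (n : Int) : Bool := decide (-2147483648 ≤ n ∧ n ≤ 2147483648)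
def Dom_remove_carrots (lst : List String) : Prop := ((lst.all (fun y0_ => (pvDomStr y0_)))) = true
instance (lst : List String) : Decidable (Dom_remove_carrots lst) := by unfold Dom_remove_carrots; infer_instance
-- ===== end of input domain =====

-- B keeps every item except repeated "Carrots": first find the index of the first "Carrots",
-- then keep each item whose value is not "Carrots" or whose position equals that index (simpler decomposition; same cost).

-- ===== PORT A =====
-- literal port of A: empty guard, then a running (new_lst, carrot_encountered) state over the list
def remove_carrots (lst : List String) : List String :=
  if lst = [] then []
  else
    (lst.foldl
      (fun (st : List String × Bool) item =>
        if item != "Carrots" || !st.2 then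
          (st.1 ++ [item], if item == "Carrots" then true else st.2)
        else st)
      ([], false)).1

-- ===== PORT B =====
-- literal port of B: first = index of first "Carrots" (or -1), then one position-aware filter
def remove_carrots_alt (lst : List String) : List String :=
  let first : Int :=
    match PySem.List.index? lst "Carrots" with
    | some i => (i : Int)
    | none => -1
  ((PySem.List.enumerate lst).filter (fun p => p.2 != "Carrots" || p.1 == first)).map (·.2)

-- ===== PRECONDITION & SPEC =====
def Spec_remove_carrots (lst : List String) (out : List String) : Prop := out = remove_carrots_alt lst
instance (lst : List String) (out : List String) : Decidable (Spec_remove_carrots lst out) := by unfold Spec_remove_carrots; infer_instance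

-- ===== CLAIM (what is proved, stated in full; the proofs are below) =====
def Claim_equal_remove_carrots : Prop := ∀ (lst : List String), Dom_remove_carrots lst → Spec_remove_carrots lst (remove_carrots lst)

-- ===== LEMMAS AND PROOFS =====

-- canonical description of the common result
def carrotsSpec : List String → List String
  | [] => []
  | x :: xs =>
    if x = "Carrots" then x :: xs.filter (fun y => y != "Carrots")
    else x :: carrotsSpec xs

-- A's fold once the flag is set keeps exactly the non-"Carrots" items
theorem foldA_true (lst : List String) (acc : List String) :
    lst.foldl
      (fun (st : List String × Bool) item =>
        if item != "Carrots" || !st.2 then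
          (st.1 ++ [item], if item == "Carrots" then true else st.2)
        else st)
      (acc, true)
    = (acc ++ lst.filter (fun y => y != "Carrots"), true) := by
  induction lst generalizing acc with
  | nil => simp
  | cons x xs ih =>
    rw [List.foldl_cons]
    by_cases hx : x = "Carrots"
    · rw [if_neg (by simp [hx]), ih]
      simp [hx]
    · have hc : (x != "Carrots" || !(true : Bool)) = true := by simp [hx]
      rw [if_pos hc]
      have h2 : (if x == "Carrots" then true else true) = true := by simp
      rw [h2, ih]
      simp [hx]

-- A's fold with the flag still unset computes carrotsSpec
theorem foldA_false (lst : List String) (acc : List String) :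
    (lst.foldl
      (fun (st : List String × Bool) item =>
        if item != "Carrots" || !st.2 then
          (st.1 ++ [item], if item == "Carrots" then true else st.2)
        else st)
      (acc, false)).1
    = acc ++ carrotsSpec lst := by
  induction lst generalizing acc with
  | nil => simp [carrotsSpec]
  | cons x xs ih =>
    rw [List.foldl_cons]
    have hc : (x != "Carrots" || !(false : Bool)) = true := by simp
    rw [if_pos hc]
    by_cases hx : x = "Carrots"
    · have h2 : (if x == "Carrots" then true else false) = true := by simp [hx]
      rw [h2, foldA_true]
      simp [carrotsSpec, hx]
    · have h2 : (if x == "Carrots" then true else false) = false := by simp [hx]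
      rw [h2, ih]
      simp [carrotsSpec, hx]

theorem portA_eq_spec (lst : List String) : remove_carrots lst = carrotsSpec lst := by
  unfold remove_carrots
  by_cases h : lst = []
  · subst h; simp [carrotsSpec]
  · rw [if_neg h, foldA_false]; simp

-- B-side: indexed filter over the tail past the first "Carrots" (index disjunct never fires)
theorem filt_tail (suf : List String) (s k : Int) (h : k < s) :
    ((PySem.List.enumerate suf s).filter (fun p => p.2 != "Carrots" || p.1 == k)).map (·.2)
    = suf.filter (fun y => y != "Carrots") := by
  induction suf generalizing s with
  | nil => simp [PySem.List.enumerate_nil]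
  | cons x xs ih =>
    have hk : (s == k) = false := by
      simp only [beq_eq_false_iff_ne]; omega
    rw [PySem.List.enumerate_cons, List.filter_cons, List.filter_cons]
    by_cases hx : x = "Carrots"
    · simp only [hx, hk]
      simp [ih (s + 1) (by omega)]
    · have hb : (x != "Carrots") = true := by simp [hx]
      simp only [hb, hk]
      simp [ih (s + 1) (by omega)]

-- B-side: indexed filter over a "Carrots"-free list keeps everything
theorem filt_all (pre : List String) (s k : Int) (h : "Carrots" ∉ pre) :
    ((PySem.List.enumerate pre s).filter (fun p => p.2 != "Carrots" || p.1 == k)).map (·.2)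
    = pre := by
  have hfil : (PySem.List.enumerate pre s).filter (fun p => p.2 != "Carrots" || p.1 == k)
      = PySem.List.enumerate pre s := by
    apply List.filter_eq_self.2
    intro p hp
    rcases (PySem.List.mem_enumerate_iff pre s p).1 hp with ⟨j, hj, rfl⟩
    have : pre[j] ≠ "Carrots" := fun he => h (he ▸ List.getElem_mem hj)
    simp [this]
  rw [hfil, PySem.List.map_snd_enumerate]

theorem carrotsSpec_decomp (pre suf : List String) (h : "Carrots" ∉ pre) :
    carrotsSpec (pre ++ "Carrots" :: suf)
    = pre ++ "Carrots" :: suf.filter (fun y => y != "Carrots") := by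
  induction pre with
  | nil => simp [carrotsSpec]
  | cons x xs ih =>
    have hx : x ≠ "Carrots" := fun he => h (he ▸ List.mem_cons_self)
    simp only [List.cons_append, carrotsSpec, if_neg hx]
    rw [ih (fun hm => h (List.mem_cons_of_mem _ hm))]

theorem carrotsSpec_no (lst : List String) (h : "Carrots" ∉ lst) :
    carrotsSpec lst = lst := by
  induction lst with
  | nil => rfl
  | cons x xs ih =>
    have hx : x ≠ "Carrots" := fun he => h (he ▸ List.mem_cons_self)
    simp only [carrotsSpec, if_neg hx]
    rw [ih (fun hm => h (List.mem_cons_of_mem _ hm))]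

theorem portB_eq_spec (lst : List String) : remove_carrots_alt lst = carrotsSpec lst := by
  unfold remove_carrots_alt
  by_cases hmem : "Carrots" ∈ lst
  · rcases Option.isSome_iff_exists.1 ((PySem.List.index?_isSome_iff lst "Carrots").2 hmem)
      with ⟨kk, hk⟩
    rcases (PySem.List.index?_eq_some_iff lst "Carrots" kk).1 hk with ⟨pre, suf, rfl, hlen, hpre⟩
    simp only [hk]
    rw [PySem.List.enumerate_append, PySem.List.enumerate_cons,
        List.filter_append, List.filter_cons, List.map_append]
    have hmid : ((("Carrots" : String) != "Carrots" || ((0 + (pre.length : Int)) == (kk : Int)))) = true := by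
      simp [← hlen]
    simp only [hmid, if_pos]
    rw [carrotsSpec_decomp pre suf hpre]
    rw [filt_all pre 0 kk hpre]
    simp only [List.map_cons]
    rw [filt_tail suf (0 + (pre.length : Int) + 1) kk (by omega)]
  · have hn : PySem.List.index? lst "Carrots" = none :=
      (PySem.List.index?_eq_none_iff lst "Carrots").2 hmem
    simp only [hn]
    rw [filt_all lst 0 (-1) hmem, carrotsSpec_no lst hmem]

-- ===== VERDICT (by name: the statement is the Claim_ definition above) =====
theorem remove_carrots_spec : Claim_equal_remove_carrots := by
  intro lst _
  unfold Spec_remove_carrots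
  rw [portA_eq_spec, portB_eq_spec]
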